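-- pv_equiv track=rewrite | github.com/PeterLuschny/Gists | WalksOnACircle.py | isWalk
-- ===== SOURCE A (Python) =====
-- def isWalk(m, S) :
--     vec = [0]*m
--     max = len(S) // m
--     dir = 0
--     os = S[0]
--     for s in S :
--         if s and os :
--             dir += 1
--         elif not s and not os :
--             dir -=1
--         dir %= m
--         v = vec[dir] + 1
--         vec[dir] = v
--         if v > max :
--             return False
--         os = s
--     return True
-- ===== SOURCE B (Python) =====
-- def isWalk(m, S):
--     cap = len(S) // m
--     dirs = []
--     d = 0
--     prev = S[0]
--     for s in S:
--         if s and prev: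
--             d += 1
--         elif not s and not prev:
--             d -= 1
--         d %= m
--         dirs.append(d)
--         prev = s
--     dirs.sort()
--     return all(dirs[i] != dirs[i + cap] for i in range(len(dirs) - cap))
-- ===== Notes on version B (the rewrite author's own statement) =====
-- stated objective: alternative
-- what changed: B abandons A's bucket-count vector with its mid-loop threshold early exit: it builds the direction sequence, sorts it once, and decides validity by checking that no value spans cap+1 consecutive slots of the sorted list (sorted[i] != sorted[i+cap]), so no per-direction counting structure exists at all.
import Mathlib
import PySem

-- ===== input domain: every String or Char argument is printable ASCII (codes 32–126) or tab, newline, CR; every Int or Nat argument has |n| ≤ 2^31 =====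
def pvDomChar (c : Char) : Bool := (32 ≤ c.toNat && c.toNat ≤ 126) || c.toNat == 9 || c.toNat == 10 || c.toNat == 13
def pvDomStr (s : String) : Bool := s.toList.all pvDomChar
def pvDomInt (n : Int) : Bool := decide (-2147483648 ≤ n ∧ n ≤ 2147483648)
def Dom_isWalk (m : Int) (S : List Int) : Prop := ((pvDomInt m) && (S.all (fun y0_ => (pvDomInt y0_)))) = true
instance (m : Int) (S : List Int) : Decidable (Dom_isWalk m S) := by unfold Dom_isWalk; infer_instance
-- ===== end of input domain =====

-- B drops A's bucket-count vector and early exit: it sorts the direction sequence once and checks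
-- that no value spans cap+1 consecutive slots (objective: alternative, sorting-based).

-- ===== PORT A =====
def isWalkLoop (m maxv : Int) : List Int → Int → Int → List Int → Bool
  | [], _, _, _ => true
  | s :: rest, dir, os, vec =>
      let dir1 := if s ≠ 0 ∧ os ≠ 0 then dir + 1 else if s = 0 ∧ os = 0 then dir - 1 else dir
      let dir2 := PySem.Int.mod dir1 m
      let v := PySem.List.pyGetD vec dir2 0 + 1
      let vec' := PySem.List.pySetD vec dir2 v
      if v > maxv then false else isWalkLoop m maxv rest dir2 s vec'

def isWalk (m : Int) (S : List Int) : Bool :=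
  let vec := List.replicate m.toNat (0 : Int)
  let maxv := PySem.Int.floordiv (S.length : Int) m
  let os := PySem.List.pyGetD S 0 0
  isWalkLoop m maxv S 0 os vec

-- ===== PORT B =====
-- first loop of Source B: build the list of successive direction values (mod m)
def dirsLoop (m : Int) : List Int → Int → Int → List Int
  | [], _, _ => []
  | s :: rest, d, prev =>
      let d1 := if s ≠ 0 ∧ prev ≠ 0 then d + 1 else if s = 0 ∧ prev = 0 then d - 1 else d
      let d2 := PySem.Int.mod d1 m
      d2 :: dirsLoop m rest d2 s

def isWalk_alt (m : Int) (S : List Int) : Bool :=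
  let cap := PySem.Int.floordiv (S.length : Int) m
  let dirs := dirsLoop m S 0 (PySem.List.pyGetD S 0 0)
  let srt := PySem.List.sorted dirs (fun x => x) false
  (List.range (srt.length - cap.toNat)).all
    (fun i => srt.getD i 0 ≠ srt.getD (i + cap.toNat) 0)

-- ===== PRECONDITION & SPEC =====
-- Pre_ excludes exactly the inputs where the Python A raises: m = 0 (ZeroDivisionError on len(S)//m),
-- m < 0 (IndexError on vec[dir] with vec = []), and S = [] (IndexError on S[0]).
def Pre_isWalk (m : Int) (S : List Int) : Prop := 1 ≤ m ∧ S ≠ []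
instance (m : Int) (S : List Int) : Decidable (Pre_isWalk m S) := by unfold Pre_isWalk; infer_instance
def pvWitness_isWalk : Int × List Int := (2, [1, 0, 1, 0])
def Spec_isWalk (m : Int) (S : List Int) (out : Bool) : Prop := out = isWalk_alt m S
instance (m : Int) (S : List Int) (out : Bool) : Decidable (Spec_isWalk m S out) := by unfold Spec_isWalk; infer_instance

-- ===== CLAIM (what is proved, stated in full; the proofs are below) =====
def Claim_equal_isWalk : Prop := ∀ (m : Int) (S : List Int), Dom_isWalk m S → Pre_isWalk m S → Spec_isWalk m S (isWalk m S)

-- ===== LEMMAS AND PROOFS =====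

-- pure tally over precomputed bucket indices (models A's vec updates)
def tallyN : List Nat → List Int → List Int
  | [], c => c
  | d :: ds, c => tallyN ds (c.set d (c.getD d 0 + 1))

lemma mod_bounds {m : Int} (hm : 1 ≤ m) (a : Int) :
    0 ≤ PySem.Int.mod a m ∧ PySem.Int.mod a m < m :=
  ⟨PySem.Int.mod_nonneg a (by omega), PySem.Int.mod_lt a (by omega)⟩

lemma tallyN_length : ∀ (ds : List Nat) (c : List Int), (tallyN ds c).length = c.length := by
  intro ds
  induction ds with
  | nil => intro c; rfl
  | cons d ds ih => intro c; rw [tallyN, ih, List.length_set]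

lemma tallyN_mono : ∀ (ds : List Nat) (c : List Int) (i : Nat),
    c.getD i 0 ≤ (tallyN ds c).getD i 0 := by
  intro ds
  induction ds with
  | nil => intro c i; exact le_refl _
  | cons d ds ih =>
      intro c i
      refine le_trans ?_ (ih _ i)
      rcases Nat.lt_or_ge i c.length with hi | hi
      · rw [List.getD_eq_getElem _ _ hi, List.getD_eq_getElem _ _ (by simpa using hi),
          List.getElem_set]
        split
        · rename_i hEq
          subst hEq
          rw [List.getD_eq_getElem _ _ hi]
          omega
        · exact le_refl _
      · rw [List.getD_eq_default _ _ hi, List.getD_eq_default _ _ (by simpa using hi)]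

lemma all_eq_false_of_big {maxv : Int} {c : List Int} {i : Nat} (hi : i < c.length)
    (hbig : maxv < c.getD i 0) : c.all (· ≤ maxv) = false := by
  rw [List.getD_eq_getElem _ _ hi] at hbig
  cases hall : c.all (· ≤ maxv) with
  | false => rfl
  | true =>
      rw [List.all_eq_true] at hall
      have := hall _ (c.getElem_mem hi)
      simp at this
      omega

-- A's loop equals: tally B's direction list and check every bucket at the end
lemma key {m : Int} (maxv : Int) (hm : 1 ≤ m) :
    ∀ (L : List Int) (dir os : Int) (counts : List Int),
      counts.length = m.toNat →
      counts.all (· ≤ maxv) = true →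
      isWalkLoop m maxv L dir os counts
        = (tallyN ((dirsLoop m L dir os).map Int.toNat) counts).all (· ≤ maxv) := by
  intro L
  induction L with
  | nil => intro dir os counts _ hall; exact hall.symm
  | cons s t ih =>
      intro dir os counts hlen hall
      simp only [isWalkLoop, dirsLoop, List.map_cons, tallyN]
      set d1 := if s ≠ 0 ∧ os ≠ 0 then dir + 1 else if s = 0 ∧ os = 0 then dir - 1 else dir with hd1
      obtain ⟨h0, h1⟩ := mod_bounds hm d1
      have hlt : (PySem.Int.mod d1 m).toNat < counts.length := by omega
      rw [PySem.List.pySetD_of_nonneg _ _ h0,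
        PySem.List.pyGetD_eq_getElem _ _ h0 (by rw [hlen]; omega),
        List.getD_eq_getElem _ _ hlt]
      set d := (PySem.Int.mod d1 m).toNat with hd
      set v := counts[d]'hlt + 1 with hv
      split
      · rename_i hbig
        refine (all_eq_false_of_big (i := d) ?_ ?_).symm
        · rw [tallyN_length, List.length_set]; exact hlt
        · refine lt_of_lt_of_le ?_ (tallyN_mono _ _ d)
          rw [List.getD_eq_getElem _ _ (by rw [List.length_set]; exact hlt), List.getElem_set_self]
          omega
      · rename_i hsmall
        exact ih _ s (counts.set d v)
          (by rw [List.length_set]; exact hlen)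
          (by
            rw [List.all_eq_true] at hall ⊢
            intro x hx
            rcases List.mem_or_eq_of_mem_set hx with hmem | hEq
            · exact hall _ hmem
            · subst hEq; simp; omega)

lemma getD_set_ne (c : List Int) (d i : Nat) (v : Int) (h : i ≠ d) :
    (c.set d v).getD i 0 = c.getD i 0 := by
  rcases Nat.lt_or_ge i c.length with hi | hi
  · rw [List.getD_eq_getElem _ _ (by simpa using hi), List.getD_eq_getElem _ _ hi,
      List.getElem_set_ne (by omega)]
  · rw [List.getD_eq_default _ _ (by simpa using hi), List.getD_eq_default _ _ hi]

-- tally of in-range buckets computes counts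
lemma tallyN_getD : ∀ (ds : List Nat) (c : List Int) (i : Nat),
    (∀ d ∈ ds, d < c.length) →
    (tallyN ds c).getD i 0 = c.getD i 0 + (ds.count i : Int) := by
  intro ds
  induction ds with
  | nil => intro c i _; simp [tallyN]
  | cons d ds ih =>
      intro c i hlt
      have hd : d < c.length := hlt d (by simp)
      rw [tallyN, ih _ i (by intro e he; rw [List.length_set]; exact hlt e (by simp [he]))]
      by_cases hid : i = d
      · subst hid
        rw [List.getD_eq_getElem _ _ (by rw [List.length_set]; exact hd), List.getElem_set_self,
          List.getD_eq_getElem _ _ hd, List.count_cons]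
        simp
        omega
      · rw [getD_set_ne _ _ _ _ hid, List.count_cons]
        simp
        omega

-- ----- sorted-scan ↔ bounded multiplicity -----

lemma pairwise_getElem_mono {l : List Int} (hp : l.Pairwise (· ≤ ·))
    {i j : Nat} (hij : i ≤ j) (hj : j < l.length) :
    l[i]'(lt_of_le_of_lt hij hj) ≤ l[j] := by
  rcases Nat.lt_or_ge i j with h | h
  · exact (List.pairwise_iff_getElem.mp hp) i j (lt_of_le_of_lt hij hj) hj h
  · have : i = j := le_antisymm hij h
    subst this; exact le_refl _

lemma squeeze {l : List Int} (hp : l.Pairwise (· ≤ ·)) {i j p : Nat}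
    (hij : i ≤ j) (hjp : j ≤ p) (hplen : p < l.length) {x : Int}
    (hi : l[i]'(by omega) = x) (hpv : l[p] = x) : l[j]'(by omega) = x := by
  have h1 := pairwise_getElem_mono hp hij (by omega)
  have h2 := pairwise_getElem_mono hp hjp hplen
  rw [hi] at h1; rw [hpv] at h2; omega

-- from count ≥ k+1, some occurrence sits at index ≥ k
lemma exists_late_pos {x : Int} : ∀ (l : List Int) (k : Nat), k + 1 ≤ l.count x →
    ∃ p, ∃ (h : p < l.length), k ≤ p ∧ l[p] = x := by
  intro l
  induction l with
  | nil => intro k h; simp at h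
  | cons a t ih =>
      intro k h
      by_cases hax : a = x
      · cases k with
        | zero =>
            exact ⟨0, by simp, Nat.zero_le _, by simpa using hax⟩
        | succ k' =>
            have hct : k' + 1 ≤ t.count x := by
              simp [hax] at h; omega
            obtain ⟨p, hp, hkp, hval⟩ := ih k' hct
            exact ⟨p + 1, by simpa using Nat.succ_lt_succ hp, by omega, by simpa using hval⟩
      · have hct : k + 1 ≤ t.count x := by
          simp [hax] at h; omega
        obtain ⟨p, hp, hkp, hval⟩ := ih k hct
        exact ⟨p + 1, by simpa using Nat.succ_lt_succ hp, by omega, by simpa using hval⟩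

-- sorted, count ≥ k+1 ⇒ two equal entries at distance k
lemma exists_pair_of_count {x : Int} : ∀ (l : List Int) (k : Nat), l.Pairwise (· ≤ ·) →
    k + 1 ≤ l.count x →
    ∃ i, ∃ (h : i + k < l.length), l[i]'(by omega) = l[i + k] := by
  intro l
  induction l with
  | nil => intro k _ h; simp at h
  | cons a t ih =>
      intro k hp hcount
      rcases List.pairwise_cons.mp hp with ⟨hall, hpt⟩
      by_cases hax : a = x
      · cases k with
        | zero => exact ⟨0, by simp, rfl⟩
        | succ k' =>
            have hct : k' + 1 ≤ t.count x := by
              simp [hax] at hcount; omega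
            obtain ⟨p, hplen, hkp, hval⟩ := exists_late_pos t k' hct
            have hlen : k' + 1 < (a :: t).length := by simp; omega
            have hx0 : (a :: t)[0] = x := hax
            have hxp : (a :: t)[p + 1]'(by simpa using Nat.succ_lt_succ hplen) = x := by
              simpa using hval
            have hk : (a :: t)[k' + 1]'hlen = x :=
              squeeze hp (Nat.zero_le _) (by omega) (by simpa using Nat.succ_lt_succ hplen) hx0 hxp
            refine ⟨0, by simpa using hlen, ?_⟩
            simp only [Nat.zero_add]
            rw [hx0, hk]
      · have hct : k + 1 ≤ t.count x := by
          simp [hax] at hcount; omega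
        obtain ⟨i, hi, heq⟩ := ih k hpt hct
        refine ⟨i + 1, by simp; omega, ?_⟩
        have hq : (a :: t)[i + 1]? = (a :: t)[i + 1 + k]? := by
          rw [show i + 1 + k = (i + k) + 1 from by omega]
          rw [List.getElem?_cons_succ, List.getElem?_cons_succ,
            List.getElem?_eq_getElem (by omega : i < t.length), List.getElem?_eq_getElem hi, heq]
        rw [List.getElem?_eq_getElem (by simp; omega : i + 1 < (a :: t).length),
          List.getElem?_eq_getElem (by simp; omega : i + 1 + k < (a :: t).length)] at hq
        exact Option.some.inj hq

-- a window of k+1 equal entries forces count ≥ k+1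
lemma count_of_window {l : List Int} (hp : l.Pairwise (· ≤ ·)) {i k : Nat}
    (hik : i + k < l.length) (heq : l[i]'(by omega) = l[i + k]) :
    k + 1 ≤ l.count (l[i]'(by omega)) := by
  set x := l[i]'(by omega) with hx
  have hseg : ∀ j, i ≤ j → j ≤ i + k → ∀ (hj : j < l.length), l[j] = x := by
    intro j h1 h2 hj
    exact squeeze hp h1 h2 hik hx.symm heq.symm
  set seg := (l.drop i).take (k + 1) with hsegdef
  have hsub : seg.Sublist l := (List.take_sublist _ _).trans (List.drop_sublist _ _)
  have hlen : seg.length = k + 1 := by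
    rw [hsegdef, List.length_take, List.length_drop]; omega
  have hallx : ∀ b ∈ seg, x = b := by
    intro b hb
    obtain ⟨j, hj, rfl⟩ := List.mem_iff_getElem.mp hb
    simp only [hsegdef, List.getElem_take, List.getElem_drop]
    exact (hseg (i + j) (by omega) (by omega) (by omega)).symm
  have hcnt : seg.count x = seg.length := List.count_eq_length.mpr hallx
  calc k + 1 = seg.count x := by rw [hcnt, hlen]
    _ ≤ l.count x := hsub.count_le x

lemma scan_iff_count {l : List Int} (hp : l.Pairwise (· ≤ ·)) (k : Nat) :
    ((List.range (l.length - k)).all (fun i => l.getD i 0 ≠ l.getD (i + k) 0) = true)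
      ↔ ∀ x : Int, l.count x ≤ k := by
  constructor
  · intro hall x
    by_contra hgt
    obtain ⟨i, hik, heq⟩ := exists_pair_of_count (x := x) l k hp (by omega)
    rw [List.all_eq_true] at hall
    have hi := hall i (List.mem_range.mpr (by omega))
    rw [decide_eq_true_eq] at hi
    rw [List.getD_eq_getElem _ _ (by omega), List.getD_eq_getElem _ _ hik] at hi
    exact hi heq
  · intro hcount
    rw [List.all_eq_true]
    intro i hi
    rw [List.mem_range] at hi
    have hik : i + k < l.length := by omega
    rw [decide_eq_true_eq]
    rw [List.getD_eq_getElem _ _ (by omega), List.getD_eq_getElem _ _ hik]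
    intro heq
    have h1 := count_of_window hp hik heq
    have h2 := hcount (l[i]'(by omega))
    omega

lemma dirsLoop_mem {m : Int} (hm : 1 ≤ m) :
    ∀ (L : List Int) (d p : Int), ∀ x ∈ dirsLoop m L d p, 0 ≤ x ∧ x < m := by
  intro L
  induction L with
  | nil => intro d p x hx; simp [dirsLoop] at hx
  | cons s t ih =>
      intro d p x hx
      simp only [dirsLoop, List.mem_cons] at hx
      rcases hx with h | h
      · subst h; exact mod_bounds hm _
      · exact ih _ _ x h

lemma count_map_toNat : ∀ (l : List Int), (∀ y ∈ l, 0 ≤ y) → ∀ i : Nat,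
    (l.map Int.toNat).count i = l.count (i : Int) := by
  intro l
  induction l with
  | nil => intro _ i; rfl
  | cons a t ih =>
      intro h i
      have ha : 0 ≤ a := h a (by simp)
      rw [List.map_cons, List.count_cons, List.count_cons, ih (fun y hy => h y (by simp [hy])) i]
      by_cases hcase : a = (i : Int)
      · simp [hcase]
      · have h2 : a.toNat ≠ i := by omega
        simp [hcase, h2]

lemma main_eq {m : Int} {S : List Int} (hm : 1 ≤ m) : isWalk m S = isWalk_alt m S := by
  unfold isWalk isWalk_alt
  set os := PySem.List.pyGetD S 0 0 with hos
  set cap := PySem.Int.floordiv (S.length : Int) m with hcapdef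
  have hcap0 : 0 ≤ cap := by
    rw [hcapdef, PySem.Int.floordiv_eq_ediv_of_pos (by omega)]
    exact Int.ediv_nonneg (by positivity) (by omega)
  set dirs := dirsLoop m S 0 os with hdirs
  have hmem := dirsLoop_mem hm S 0 os
  rw [key cap hm S 0 os _ (List.length_replicate) (by
      rw [List.all_eq_true]; intro x hx; rw [List.eq_of_mem_replicate hx]; simpa using hcap0)]
  set dsN := dirs.map Int.toNat with hdsN
  set vec := tallyN dsN (List.replicate m.toNat 0) with hvec
  set srt := PySem.List.sorted dirs (fun x => x) false with hsrt
  have hpw : srt.Pairwise (· ≤ ·) := by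
    have := PySem.List.sorted_pairwise (xs := dirs) (key := fun x => x)
    simpa [hsrt] using this
  have hperm : srt.Perm dirs := PySem.List.sorted_perm dirs (fun x => x) false
  have hvlen : vec.length = m.toNat := by rw [hvec, tallyN_length, List.length_replicate]
  have hboundN : ∀ d ∈ dsN, d < (List.replicate m.toNat (0 : Int)).length := by
    rw [List.length_replicate]
    intro d hd
    rw [hdsN, List.mem_map] at hd
    obtain ⟨y, hy, rfl⟩ := hd
    have := hmem y hy
    omega
  have hget : ∀ i : Nat, vec.getD i 0 = (dsN.count i : Int) := by
    intro i
    rw [hvec, tallyN_getD _ _ _ hboundN]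
    have hz : (List.replicate m.toNat (0 : Int)).getD i 0 = 0 := by
      rcases Nat.lt_or_ge i m.toNat with h | h
      · rw [List.getD_eq_getElem _ _ (by simpa using h)]; simp
      · rw [List.getD_eq_default _ _ (by simpa using h)]
    rw [hz, zero_add]
  have hAi : (vec.all (· ≤ cap) = true) ↔ ∀ i : Nat, (dsN.count i : Int) ≤ cap := by
    rw [List.all_eq_true]
    constructor
    · intro h i
      rcases Nat.lt_or_ge i m.toNat with hi | hi
      · have hm1 := h (vec[i]'(by omega)) (List.getElem_mem _)
        rw [decide_eq_true_eq] at hm1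
        have e : (dsN.count i : Int) = vec[i]'(by omega) := by
          rw [← hget i, List.getD_eq_getElem _ _ (by omega)]
        rw [e]; exact hm1
      · have hz : dsN.count i = 0 := by
          rw [List.count_eq_zero]
          intro hmemi
          have := hboundN i hmemi
          rw [List.length_replicate] at this
          omega
        rw [hz]; simpa using hcap0
    · intro h v hv
      rw [decide_eq_true_eq]
      obtain ⟨i, hi, rfl⟩ := List.mem_iff_getElem.mp hv
      have h2 := h i
      rw [← hget i, List.getD_eq_getElem _ _ hi] at h2
      exact h2
  have hA : (vec.all (· ≤ cap) = true) ↔ ∀ x : Int, dirs.count x ≤ cap.toNat := by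
    rw [hAi]
    constructor
    · intro h x
      rcases (by omega : 0 ≤ x ∨ x < 0) with hx0 | hx0
      · have hcnt : dsN.count x.toNat = dirs.count x := by
          rw [hdsN, count_map_toNat dirs (fun y hy => (hmem y hy).1) x.toNat,
            Int.toNat_of_nonneg hx0]
        have := h x.toNat
        omega
      · have hz : dirs.count x = 0 := by
          rw [List.count_eq_zero]
          intro hc
          have := (hmem x hc).1
          omega
        omega
    · intro h i
      have hcnt : dsN.count i = dirs.count (i : Int) := by
        rw [hdsN, count_map_toNat dirs (fun y hy => (hmem y hy).1) i]
      have := h (i : Int)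
      omega
  have hB : ((List.range (srt.length - cap.toNat)).all
      (fun i => srt.getD i 0 ≠ srt.getD (i + cap.toNat) 0) = true)
      ↔ ∀ x : Int, dirs.count x ≤ cap.toNat := by
    rw [scan_iff_count hpw]
    constructor
    · intro h x
      rw [← hperm.count_eq x]
      exact h x
    · intro h x
      rw [hperm.count_eq x]
      exact h x
  exact Bool.eq_iff_iff.mpr ⟨fun h => hB.mpr (hA.mp h), fun h => hA.mpr (hB.mp h)⟩

-- ===== VERDICT (by name: the statement is the Claim_ definition above) =====
theorem isWalk_spec : Claim_equal_isWalk := by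
  intro m S _ hpre
  exact main_eq hpre.1
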